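-- pv_equiv track=rewrite | github.com/pat-the-geek/musique-collection-roon-tracker | src/cli/commands/timeline.py | group_by_hour
-- ===== SOURCE A (Python) =====
-- from typing import List, Dict, Optional
-- from collections import defaultdict
--
-- def group_by_hour(tracks: List[Dict]) -> Dict[int, List[Dict]]:
--     """
--     Group tracks by hour of the day.
--
--     Args:
--         tracks: List of track dictionaries
--
--     Returns:
--         Dictionary mapping hour (0-23) to list of tracks
--     """
--     hourly = defaultdict(list)
--
--     for track in tracks:
--         date_str = track.get('date', '')
--         if not date_str or ' ' not in date_str:
--             continue
--
--         try:
--             time_part = date_str.split(' ')[1]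
--             hour = int(time_part.split(':')[0])
--             hourly[hour].append(track)
--         except (ValueError, IndexError):
--             continue
--
--     return dict(hourly)
-- ===== SOURCE B (Python) =====
-- def _hour_of(track):
--     date_str = track.get('date', '')
--     if not date_str or ' ' not in date_str:
--         return None
--     try:
--         return int(date_str.split(' ')[1].split(':')[0])
--     except (ValueError, IndexError):
--         return None
--
-- def group_by_hour(tracks):
--     pairs = [(h, t) for t in tracks if (h := _hour_of(t)) is not None]
--     hours = list(dict.fromkeys(h for h, _ in pairs))
--     return {h: [t for hh, t in pairs if hh == h] for h in hours}
-- ===== Notes on version B (the rewrite author's own statement) =====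
-- stated objective: alternative
-- what changed: B replaces A's single-pass defaultdict bucketing with an index-build pass producing (hour, track) pairs, an ordered dedup of the hours, and one filter per distinct hour via a dict comprehension.
import Mathlib
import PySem

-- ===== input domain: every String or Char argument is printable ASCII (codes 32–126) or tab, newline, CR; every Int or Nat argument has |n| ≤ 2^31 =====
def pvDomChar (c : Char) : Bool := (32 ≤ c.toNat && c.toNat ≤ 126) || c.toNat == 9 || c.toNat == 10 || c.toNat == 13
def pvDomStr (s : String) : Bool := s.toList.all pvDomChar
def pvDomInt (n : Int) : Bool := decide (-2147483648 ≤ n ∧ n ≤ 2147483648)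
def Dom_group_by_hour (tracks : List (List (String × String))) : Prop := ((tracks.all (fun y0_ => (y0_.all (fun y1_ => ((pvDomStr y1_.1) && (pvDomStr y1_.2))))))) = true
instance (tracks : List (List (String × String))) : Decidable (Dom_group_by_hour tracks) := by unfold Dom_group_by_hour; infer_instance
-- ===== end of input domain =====

-- B replaces A's incremental defaultdict bucketing by an index-build pass (one (hour, track)
-- pair per parsable track) followed by a dedup of the hours and one filter per distinct hour;
-- objective: alternative decomposition, same observable result.

-- ===== PORT A =====
-- A in one fold: a defaultdict(list) is a Dict with modify (default []), dict(hourly) is .items.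
def group_by_hour (tracks : List (List (String × String))) : List (Int × List (List (String × String))) :=
  (tracks.foldl
    (fun (hourly : PySem.Dict Int (List (List (String × String)))) track =>
      let date_str := PySem.Dict.getD (PySem.Dict.mk track) "date" ""
      if date_str = "" || !(PySem.Str.isIn " " date_str) then hourly
      else
        match PySem.List.pyGet? ((PySem.Str.split? date_str " ").getD []) 1 with
        | none => hourly
        | some time_part =>
          match PySem.List.pyGet? ((PySem.Str.split? time_part ":").getD []) 0 with
          | none => hourly
          | some h0 =>
            match PySem.Int.ofStr? h0 with
            | none => hourly
            | some hour => hourly.modify hour [] (· ++ [track]))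
    PySem.Dict.empty).items

-- ===== PORT B =====
-- _hour_of: parse the hour of one track, None where A's loop skips the track.
def pvHourOf (track : List (String × String)) : Option Int :=
  let date_str := PySem.Dict.getD (PySem.Dict.mk track) "date" ""
  if date_str = "" || !(PySem.Str.isIn " " date_str) then none
  else
    match PySem.List.pyGet? ((PySem.Str.split? date_str " ").getD []) 1 with
    | none => none
    | some time_part =>
      match PySem.List.pyGet? ((PySem.Str.split? time_part ":").getD []) 0 with
      | none => none
      | some h0 => PySem.Int.ofStr? h0

def group_by_hour_alt (tracks : List (List (String × String))) : List (Int × List (List (String × String))) :=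
  let pairs := tracks.filterMap (fun t => (pvHourOf t).map (fun h => (h, t)))
  let hours := PySem.List.dedup (pairs.map (fun p => p.1))
  hours.map (fun h => (h, (pairs.filter (fun p => p.1 == h)).map (fun p => p.2)))

-- ===== PRECONDITION & SPEC =====
def Spec_group_by_hour (tracks : List (List (String × String))) (out : List (Int × List (List (String × String)))) : Prop := out = group_by_hour_alt tracks
instance (tracks : List (List (String × String))) (out : List (Int × List (List (String × String)))) : Decidable (Spec_group_by_hour tracks out) := by unfold Spec_group_by_hour; infer_instance

-- ===== CLAIM (what is proved, stated in full; the proofs are below) =====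
def Claim_equal_group_by_hour : Prop := ∀ (tracks : List (List (String × String))), Dom_group_by_hour tracks → Spec_group_by_hour tracks (group_by_hour tracks)

-- ===== LEMMAS AND PROOFS =====

-- A's loop body, in terms of pvHourOf: a skipped track leaves the dict unchanged.
theorem stepA_eq_hourOf (hourly : PySem.Dict Int (List (List (String × String))))
    (track : List (String × String)) :
    (let date_str := PySem.Dict.getD (PySem.Dict.mk track) "date" ""
      if date_str = "" || !(PySem.Str.isIn " " date_str) then hourly
      else
        match PySem.List.pyGet? ((PySem.Str.split? date_str " ").getD []) 1 with
        | none => hourly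
        | some time_part =>
          match PySem.List.pyGet? ((PySem.Str.split? time_part ":").getD []) 0 with
          | none => hourly
          | some h0 =>
            match PySem.Int.ofStr? h0 with
            | none => hourly
            | some hour => hourly.modify hour [] (· ++ [track])) =
    (match pvHourOf track with
     | none => hourly
     | some hour => hourly.modify hour [] (· ++ [track])) := by
  simp only [pvHourOf]
  split_ifs with hC
  · rfl
  · cases h1 : PySem.List.pyGet? ((PySem.Str.split? (PySem.Dict.getD (PySem.Dict.mk track) "date" "") " ").getD []) 1 with
    | none => simp
    | some tp =>
      cases h2 : PySem.List.pyGet? ((PySem.Str.split? tp ":").getD []) 0 with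
      | none => simp [h2]
      | some h0 => cases h3 : PySem.Int.ofStr? h0 <;> simp [h2, h3]

-- A's fold over tracks equals the modify-fold over B's (hour, track) index.
theorem foldA_eq_fold_pairs (tracks : List (List (String × String)))
    (d : PySem.Dict Int (List (List (String × String)))) :
    tracks.foldl
      (fun hourly track =>
        let date_str := PySem.Dict.getD (PySem.Dict.mk track) "date" ""
        if date_str = "" || !(PySem.Str.isIn " " date_str) then hourly
        else
          match PySem.List.pyGet? ((PySem.Str.split? date_str " ").getD []) 1 with
          | none => hourly
          | some time_part =>
            match PySem.List.pyGet? ((PySem.Str.split? time_part ":").getD []) 0 with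
            | none => hourly
            | some h0 =>
              match PySem.Int.ofStr? h0 with
              | none => hourly
              | some hour => hourly.modify hour [] (· ++ [track])) d =
    (tracks.filterMap (fun t => (pvHourOf t).map (fun h => (h, t)))).foldl
      (fun d p => d.modify p.1 [] (· ++ [p.2])) d := by
  induction tracks generalizing d with
  | nil => rfl
  | cons t ts ih =>
    simp only [List.foldl_cons, List.filterMap_cons]
    rw [stepA_eq_hourOf d t]
    cases h : pvHourOf t with
    | none => simpa using ih d
    | some hour => simpa using ih (d.modify hour [] (· ++ [t]))

-- ===== VERDICT (by name: the statement is the Claim_ definition above) =====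
theorem group_by_hour_spec : Claim_equal_group_by_hour := by
  intro tracks _
  unfold Spec_group_by_hour group_by_hour group_by_hour_alt
  rw [foldA_eq_fold_pairs]
  set l := tracks.filterMap (fun t => (pvHourOf t).map (fun h => (h, t))) with hl
  have hnd : (l.foldl (fun d p => d.modify p.1 [] (· ++ [p.2]))
      (PySem.Dict.empty : PySem.Dict Int (List (List (String × String))))).keys.Nodup := by
    exact PySem.Dict.nodup_keys_foldl_modify_key l (fun p => p.1) [] (fun d p v => v ++ [p.2]) _
      (by simp [PySem.Dict.keys_empty])
  rw [PySem.Dict.items_eq_map_keys _ hnd []]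
  rw [PySem.Dict.keys_foldl_modify_key l (fun p => p.1) [] (fun d p v => v ++ [p.2])]
  simp only [PySem.Dict.keys_empty, PySem.Set.update_nil_left, PySem.List.dedup_eq_ofList,
    PySem.Dict.getD_foldl_modify_append, PySem.Dict.getD_empty, List.nil_append]
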